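-- pv_equiv track=rewrite | github.com/bandanna2k/advent_of_code | 2021/day13/part1.py | getVerticallyFoldedGrid
-- ===== SOURCE A (Python) =====
-- def getNewGrid(maxX, maxY):
--     return [[0 for y in range(maxX)] for x in range(maxY)]
--
-- def getSizeX(grid):
--     return len(grid[0])
--
-- def getSizeY(grid):
--     return len(grid)
--
-- def getVerticallyFoldedGrid(grid, x):
--     assert getSizeX(grid) % 2 == 1
--     result = getNewGrid(int(getSizeX(grid) / 2), getSizeY(grid))
--
--     oldMaxX = getSizeX(grid)
--     maxX = getSizeX(result)
--     maxY = getSizeY(result)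
--     for x in range(maxX):
--         for y in range(maxY):
--             result[y][x] = result[y][x] + grid[y][x]
--             result[y][x] = result[y][x] + grid[y][oldMaxX - x - 1]
--
--     return result
-- ===== SOURCE B (Python) =====
-- def _foldPairs(row):
--     # peel the two ends off, sum them, recurse on the middle
--     if len(row) < 2:
--         return []
--     return [row[0] + row[-1]] + _foldPairs(row[1:-1])
--
-- def getVerticallyFoldedGrid(grid, x):
--     width = len(grid[0])
--     assert width % 2 == 1
--     return [_foldPairs(row[:width]) for row in grid]
-- ===== Notes on version B (the rewrite author's own statement) =====
-- stated objective: alternative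
-- what changed: Replaces the column-major nested index loop mutating a preallocated zero grid with an outside-in recursion per row: repeatedly peel the first and last cell, sum them, and recurse on the shrinking middle (no mirror-index arithmetic, no preallocated result).
import Mathlib
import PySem

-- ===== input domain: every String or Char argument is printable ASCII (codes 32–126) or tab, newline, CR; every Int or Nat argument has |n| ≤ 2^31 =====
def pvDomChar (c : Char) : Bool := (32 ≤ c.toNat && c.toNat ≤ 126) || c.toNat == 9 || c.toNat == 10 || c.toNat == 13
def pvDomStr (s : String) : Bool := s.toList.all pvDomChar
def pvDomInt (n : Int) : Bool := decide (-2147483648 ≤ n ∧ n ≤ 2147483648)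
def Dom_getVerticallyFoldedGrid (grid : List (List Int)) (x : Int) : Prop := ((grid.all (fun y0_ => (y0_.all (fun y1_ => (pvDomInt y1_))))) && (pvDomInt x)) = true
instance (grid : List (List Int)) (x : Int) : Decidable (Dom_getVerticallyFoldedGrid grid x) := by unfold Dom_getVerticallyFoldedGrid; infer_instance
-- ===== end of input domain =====

-- B folds each row by recursively peeling its two end cells and summing them (outside-in recursion,
-- no index arithmetic, no preallocated result); equivalence is on the RETURN value.

-- ===== PORT A =====
def pvGetNewGrid (maxX maxY : Int) : List (List Int) :=
  (PySem.List.pyRange 0 maxY 1).map (fun _ => (PySem.List.pyRange 0 maxX 1).map (fun _ => (0 : Int)))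

def pvGetSizeX (grid : List (List Int)) : Int :=
  ((PySem.List.pyGetD grid 0 []).length : Int)   -- len(grid[0]); grid ≠ [] is in Pre_

def pvGetSizeY (grid : List (List Int)) : Int := (grid.length : Int)

-- the inner loop body: result[y][x] += grid[y][x]; result[y][x] += grid[y][oldMaxX-x-1]
def pvInnerBody (grid : List (List Int)) (oldMaxX x : Int) (result : List (List Int)) (y : Int) : List (List Int) :=
  let row0 := PySem.List.pyGetD result y []
  let r1 := PySem.List.pySetD result y
      (PySem.List.pySetD row0 x (PySem.List.pyGetD row0 x 0 + PySem.List.pyGetD (PySem.List.pyGetD grid y []) x 0))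
  let row1 := PySem.List.pyGetD r1 y []
  PySem.List.pySetD r1 y
      (PySem.List.pySetD row1 x (PySem.List.pyGetD row1 x 0 + PySem.List.pyGetD (PySem.List.pyGetD grid y []) (oldMaxX - x - 1) 0))

def getVerticallyFoldedGrid (grid : List (List Int)) (x : Int) : List (List Int) :=
  -- the assert (odd width) and all index accesses are in range under Pre_
  let result := pvGetNewGrid (PySem.Int.truncdiv (pvGetSizeX grid) 2) (pvGetSizeY grid)
  -- int(w/2) is truncdiv exactly (w is a small nonnegative int)
  let oldMaxX := pvGetSizeX grid
  let maxX := pvGetSizeX result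
  let maxY := pvGetSizeY result
  (PySem.List.pyRange 0 maxX 1).foldl (fun result x =>
    (PySem.List.pyRange 0 maxY 1).foldl (pvInnerBody grid oldMaxX x) result) result

-- ===== PORT B =====
-- row[1:-1] as drop/take (termination measure of pvFoldPairs cites this)
lemma pv_slice_one_neg_one (xs : List Int) :
    PySem.List.slice xs (some 1) (some (-1)) = xs.tail.dropLast := by
  rcases xs with _ | ⟨a, t⟩
  · rfl
  · simp only [PySem.List.slice, PySem.List.clampIdx, List.tail_cons]
    rw [List.dropLast_eq_take]
    norm_num
    rw [if_neg (by omega : ¬ ((t.length : Int) < 0))]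
    omega

def pvFoldPairs (row : List Int) : List Int :=
  if h : row.length < 2 then []
  else (PySem.List.pyGetD row 0 0 + PySem.List.pyGetD row (-1) 0)
       :: pvFoldPairs (PySem.List.slice row (some 1) (some (-1)))
termination_by row.length
decreasing_by
  rw [pv_slice_one_neg_one]
  simp only [List.length_dropLast, List.length_tail]
  omega

def getVerticallyFoldedGrid_alt (grid : List (List Int)) (x : Int) : List (List Int) :=
  let width : Int := ((PySem.List.pyGetD grid 0 []).length : Int)   -- len(grid[0])
  grid.map (fun row => pvFoldPairs (PySem.List.slice row none (some width)))

-- ===== PRECONDITION & SPEC =====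
-- Pre_ excludes exactly the inputs on which A raises: empty grid (IndexError on grid[0]),
-- even width (AssertionError), and rows shorter than the width when the loop runs (IndexError).
def Pre_getVerticallyFoldedGrid (grid : List (List Int)) (x : Int) : Prop :=
  grid ≠ [] ∧ (grid.headD []).length % 2 = 1 ∧
    ∀ row ∈ grid, 1 < (grid.headD []).length → (grid.headD []).length ≤ row.length

instance (grid : List (List Int)) (x : Int) : Decidable (Pre_getVerticallyFoldedGrid grid x) := by
  unfold Pre_getVerticallyFoldedGrid; infer_instance

def pvWitness_getVerticallyFoldedGrid : List (List Int) × Int := ([[1, 2, 3], [4, 5, 6]], 0)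

def Spec_getVerticallyFoldedGrid (grid : List (List Int)) (x : Int) (out : List (List Int)) : Prop := out = getVerticallyFoldedGrid_alt grid x
instance (grid : List (List Int)) (x : Int) (out : List (List Int)) : Decidable (Spec_getVerticallyFoldedGrid grid x out) := by unfold Spec_getVerticallyFoldedGrid; infer_instance

-- ===== CLAIM (what is proved, stated in full; the proofs are below) =====
def Claim_equal_getVerticallyFoldedGrid : Prop := ∀ (grid : List (List Int)) (x : Int), Dom_getVerticallyFoldedGrid grid x → Pre_getVerticallyFoldedGrid grid x → Spec_getVerticallyFoldedGrid grid x (getVerticallyFoldedGrid grid x)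

-- ===== LEMMAS AND PROOFS =====

-- B's recursion computes the mirrored-pair sums positionally
lemma pvFoldPairs_spec (n : Nat) (row : List Int) (hn : row.length = n) :
    pvFoldPairs row = (List.range (n / 2)).map
      (fun i => row.getD i 0 + row.getD (n - 1 - i) 0) := by
  induction n using Nat.strong_induction_on generalizing row with
  | _ n ih =>
    rw [pvFoldPairs]
    by_cases h : row.length < 2
    · simp only [h, dif_pos]
      have : n / 2 = 0 := by omega
      simp [this]
    · simp only [h, dif_neg, not_false_iff]
      rw [pv_slice_one_neg_one]
      have hmid : (row.tail.dropLast).length = n - 2 := by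
        simp only [List.length_dropLast, List.length_tail]; omega
      rw [ih (n - 2) (by omega) _ hmid]
      have hrange : n / 2 = (n - 2) / 2 + 1 := by omega
      rw [hrange, List.range_succ_eq_map]
      simp only [List.map_cons, List.map_map]
      have hne2 : row ≠ [] := by intro hc; rw [hc] at hn; simp at hn; omega
      congr 1
      · rw [PySem.List.pyGetD_zero, PySem.List.pyGetD_neg_one row 0 hne2, List.getLast_eq_getElem]
        have hL : row.getD (n - 1 - 0) 0 = row[row.length - 1]'(by omega) := by
          rw [List.getD_eq_getElem _ _ (show n - 1 - 0 < row.length by omega)]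
          exact getElem_congr rfl (by omega) (by omega)
        rw [hL]
      · apply List.map_congr_left
        intro i hi
        rw [List.mem_range] at hi
        simp only [Function.comp]
        have h1 : (row.tail.dropLast).getD i 0 = row.getD (i + 1) 0 := by
          rw [List.getD_eq_getElem _ _ (by omega), List.getD_eq_getElem _ _ (by omega)]
          rw [List.getElem_dropLast, List.getElem_tail]
        have h2 : (row.tail.dropLast).getD (n - 2 - 1 - i) 0 = row.getD (n - 1 - (i + 1)) 0 := by
          rw [List.getD_eq_getElem _ _ (by omega), List.getD_eq_getElem _ _ (by omega)]
          rw [List.getElem_dropLast, List.getElem_tail]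
          congr 1; omega
        rw [h1, h2]

-- the mapIdx formula A's loop produces for one row equals B's folded row
lemma pv_row_case (row : List Int) (w h : Nat) (hw2h : w = 2 * h + 1)
    (hle : h = 0 ∨ w ≤ row.length) :
    (List.replicate h (0 : Int)).mapIdx (fun i v =>
        (v + PySem.List.pyGetD row ((i : Nat) : Int) 0)
          + PySem.List.pyGetD row (((w : Nat) : Int) - ((i : Nat) : Int) - 1) 0)
      = pvFoldPairs (PySem.List.slice row none (some ((w : Nat) : Int))) := by
  rw [PySem.List.slice_to_natCast]
  rw [pvFoldPairs_spec ((row.take w).length) _ rfl]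
  rcases hle with hz | hle
  · have h1 : (row.take w).length ≤ 1 := by
      simp only [List.length_take]
      omega
    have h2 : (row.take w).length / 2 = 0 := by omega
    rw [h2]
    simp [hz]
  · have hlt : (row.take w).length = w := by
      simp [List.length_take, Nat.min_eq_left hle]
    rw [hlt, show w / 2 = h by omega]
    apply List.ext_getElem
    · simp
    intro i hi1 hi2
    have hi : i < h := by simpa using hi1
    rw [List.getElem_mapIdx, List.getElem_replicate, List.getElem_map, List.getElem_range]
    rw [show ((w : Nat) : Int) - ((i : Nat) : Int) - 1 = ((w - 1 - i : Nat) : Int) by omega]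
    simp only [PySem.List.pyGetD_natCast]
    rw [zero_add]
    congr 1
    · rw [List.getD_eq_getElem _ _ (by omega), List.getD_eq_getElem _ _ (by omega),
          List.getElem_take]
    · rw [List.getD_eq_getElem _ _ (by omega), List.getD_eq_getElem _ _ (by omega),
          List.getElem_take]

-- the value the Python loop deposits at cell (y, i): old value + grid[y][i] + grid[y][w-i-1]
def pvRowFun (grid : List (List Int)) (oldMaxX x : Int) (y : Nat) (row : List Int) : List Int :=
  let gy := PySem.List.pyGetD grid (y : Int) []
  let row' := PySem.List.pySetD row x (PySem.List.pyGetD row x 0 + PySem.List.pyGetD gy x 0)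
  PySem.List.pySetD row' x (PySem.List.pyGetD row' x 0 + PySem.List.pyGetD gy (oldMaxX - x - 1) 0)

lemma pv_mapIdx_id {α : Type} (l : List α) : l.mapIdx (fun _ a => a) = l := by
  apply List.ext_getElem <;> simp

lemma pv_mapIdx_mapIdx {α β γ : Type} (l : List α) (f : Nat → α → β) (g : Nat → β → γ) :
    (l.mapIdx f).mapIdx g = l.mapIdx (fun i a => g i (f i a)) := by
  apply List.ext_getElem <;> simp

-- a loop that sets each index of the accumulator once, characterised positionally
lemma pv_foldl_range_set {α : Type} (d : α) (g : Nat → α → α) :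
    ∀ (k : Nat) (R : List α), k ≤ R.length →
      (List.range k).foldl (fun acc i => acc.set i (g i (acc.getD i d))) R
        = (R.take k).mapIdx g ++ R.drop k := by
  intro k
  induction k with
  | zero => simp
  | succ k ih =>
    intro R hk
    rw [List.range_succ, List.foldl_append, ih R (by omega)]
    have hlen : ((R.take k).mapIdx g).length = k := by
      simp [List.length_mapIdx]; omega
    have hkR : k < R.length := by omega
    have hdrop : R.drop k = R[k] :: R.drop (k + 1) := List.drop_eq_getElem_cons hkR
    have htake : R.take (k + 1) = R.take k ++ [R[k]] := by
      rw [List.take_add_one]; simp [List.getElem?_eq_getElem hkR]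
    simp only [List.foldl_cons, List.foldl_nil]
    rw [hdrop]
    have hget : ((R.take k).mapIdx g ++ R[k] :: R.drop (k + 1)).getD k d = R[k] := by
      rw [List.getD_eq_getElem?_getD, List.getElem?_append_right (by omega)]
      simp [hlen, List.getElem?_eq_getElem hkR]
    rw [hget, List.set_append_right _ _ (by omega), hlen]
    simp only [Nat.sub_self, List.set_cons_zero, htake, List.mapIdx_append, List.length_take]
    simp [List.mapIdx_cons, Nat.min_eq_left hkR.le]

lemma pv_innerBody_set (grid : List (List Int)) (oM x : Int) (R : List (List Int)) (y : Nat) :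
    pvInnerBody grid oM x R (y : Int) = R.set y (pvRowFun grid oM x y (R.getD y [])) := by
  unfold pvInnerBody pvRowFun
  simp only [PySem.List.pySetD_natCast, PySem.List.pyGetD_natCast]
  by_cases hy : y < R.length
  · have hgs : ∀ (L : List (List Int)) (v : List Int), y < L.length → (L.set y v).getD y [] = v := by
      intro L v h
      rw [List.getD_eq_getElem _ _ (by simpa using h), List.getElem_set_self]
    rw [List.getD_eq_getElem _ _ hy, hgs _ _ hy, List.set_set]
  · have hy' : R.length ≤ y := by omega
    simp [List.set_eq_of_length_le hy']

lemma pv_rowFun_set (grid : List (List Int)) (oM : Int) (y : Nat) (i : Nat) (r : List Int) :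
    pvRowFun grid oM (i : Int) y r
      = r.set i ((r.getD i 0 + PySem.List.pyGetD (PySem.List.pyGetD grid (y : Int) []) (i : Int) 0)
          + PySem.List.pyGetD (PySem.List.pyGetD grid (y : Int) []) (oM - (i : Int) - 1) 0) := by
  unfold pvRowFun
  simp only [PySem.List.pySetD_natCast, PySem.List.pyGetD_natCast]
  by_cases hi : i < r.length
  · have hgs : ∀ v : Int, (r.set i v).getD i 0 = v := by
      intro v
      rw [List.getD_eq_getElem _ _ (by simpa using hi), List.getElem_set_self]
    rw [hgs, List.set_set]
  · have hi' : r.length ≤ i := by omega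
    simp [List.set_eq_of_length_le hi']

lemma pv_inner_fold (grid : List (List Int)) (oM x : Int) (m : Nat) (R : List (List Int))
    (hm : R.length = m) :
    (PySem.List.pyRange 0 (m : Int) 1).foldl (pvInnerBody grid oM x) R
      = R.mapIdx (fun y row => pvRowFun grid oM x y row) := by
  rw [PySem.List.pyRange_zero_nat, List.foldl_map]
  simp only [pv_innerBody_set]
  rw [pv_foldl_range_set [] (pvRowFun grid oM x) m R (by omega), ← hm,
      List.take_length, List.drop_length, List.append_nil]

lemma pv_outer_fold (grid : List (List Int)) (oM : Int) (m : Nat) :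
    ∀ (xs : List Int) (R : List (List Int)), R.length = m →
      xs.foldl (fun R x => (PySem.List.pyRange 0 (m : Int) 1).foldl (pvInnerBody grid oM x) R) R
        = R.mapIdx (fun y row => xs.foldl (fun r x => pvRowFun grid oM x y r) row) := by
  intro xs
  induction xs with
  | nil => intro R hm; simp [pv_mapIdx_id]
  | cons x xs ih =>
    intro R hm
    rw [List.foldl_cons, pv_inner_fold grid oM x m R hm,
        ih _ (by simp [List.length_mapIdx, hm]), pv_mapIdx_mapIdx]
    simp only [List.foldl_cons]

lemma pv_row_fold (grid : List (List Int)) (oM : Int) (y h : Nat) (r : List Int)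
    (hr : r.length = h) :
    (PySem.List.pyRange 0 (h : Int) 1).foldl (fun acc x => pvRowFun grid oM x y acc) r
      = r.mapIdx (fun i v =>
          (v + PySem.List.pyGetD (PySem.List.pyGetD grid (y : Int) []) (i : Int) 0)
            + PySem.List.pyGetD (PySem.List.pyGetD grid (y : Int) []) (oM - (i : Int) - 1) 0) := by
  rw [PySem.List.pyRange_zero_nat, List.foldl_map]
  simp only [pv_rowFun_set]
  rw [pv_foldl_range_set 0 (fun i v =>
        (v + PySem.List.pyGetD (PySem.List.pyGetD grid (y : Int) []) (i : Int) 0)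
          + PySem.List.pyGetD (PySem.List.pyGetD grid (y : Int) []) (oM - (i : Int) - 1) 0) h r (by omega), ← hr,
      List.take_length, List.drop_length, List.append_nil]

lemma pv_newGrid (a b : Nat) :
    pvGetNewGrid (a : Int) (b : Int) = List.replicate b (List.replicate a (0 : Int)) := by
  unfold pvGetNewGrid
  rw [PySem.List.pyRange_zero_nat, PySem.List.pyRange_zero_nat]
  apply List.ext_getElem <;> simp [List.eq_replicate_iff]

-- ===== VERDICT (by name: the statement is the Claim_ definition above) =====
theorem getVerticallyFoldedGrid_spec : Claim_equal_getVerticallyFoldedGrid := by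
  intro grid x hdom hpre
  obtain ⟨hne, hodd, hlen⟩ := hpre
  obtain ⟨g0, gs, rfl⟩ : ∃ g0 gs, grid = g0 :: gs := by
    cases grid with
    | nil => exact absurd rfl hne
    | cons a l => exact ⟨a, l, rfl⟩
  simp only [List.headD_cons] at hodd hlen
  set w : Nat := g0.length with hw
  set h : Nat := w / 2 with hh
  have hw2h : w = 2 * h + 1 := by omega
  unfold Spec_getVerticallyFoldedGrid getVerticallyFoldedGrid getVerticallyFoldedGrid_alt
  unfold pvGetSizeX pvGetSizeY
  simp only [PySem.List.pyGetD_zero_cons]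
  have htd : PySem.Int.truncdiv (w : Int) 2 = ((h : Nat) : Int) := by
    simp [PySem.Int.truncdiv, hh]
  rw [htd, pv_newGrid h ((g0 :: gs).length)]
  have hrep : List.replicate (g0 :: gs).length (List.replicate h (0 : Int))
      = List.replicate h (0 : Int) :: List.replicate gs.length (List.replicate h (0 : Int)) := by
    simp [List.replicate_succ]
  rw [hrep]
  simp only [PySem.List.pyGetD_zero_cons, List.length_replicate, List.length_cons]
  rw [← hrep]
  rw [pv_outer_fold (g0 :: gs) ((g0.length : Nat) : Int) (gs.length + 1)
        (PySem.List.pyRange 0 (h : Int) 1) _ (by simp)]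
  apply List.ext_getElem
  · simp
  intro y hy1 hy2
  have hym : y < gs.length + 1 := by simpa using hy1
  rw [List.getElem_mapIdx, List.getElem_map, List.getElem_replicate]
  rw [pv_row_fold (g0 :: gs) ((g0.length : Nat) : Int) y h (List.replicate h 0) (by simp)]
  have hgy : PySem.List.pyGetD (g0 :: gs) (y : Int) [] = (g0 :: gs)[y] := by
    rw [PySem.List.pyGetD_natCast]
    exact List.getD_eq_getElem _ _ (by simpa using hym)
  simp only [hgy]
  exact pv_row_case (g0 :: gs)[y] g0.length h (by omega)
    (by
      by_cases hz : h = 0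
      · exact Or.inl hz
      · exact Or.inr (hlen _ (List.getElem_mem _) (by omega)))
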